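-- pv_equiv track=rewrite | github.com/and-sang/thinkpython | ch_13_case_study_data_structure_selection/ex_13_2_ebooks_analysis.py | words_analysis
-- ===== SOURCE A (Python) =====
-- def words_analysis(book, n):
--     histogram = dict()
--     for word in book:
--         histogram[word] = 1 + histogram.setdefault(word, 0)
--
--     total = len(book)
--     different = len(histogram)
--     rank = most_frequent(histogram, n)
--     return total, different, rank
--
-- def most_frequent(d, x):
--     result = []
--     t = sorted(d, key=d.get, reverse=True)
--     for word in t[:x-1]:
--         result.append((word, d[word]))
--     return result
-- ===== SOURCE B (Python) =====
-- def words_analysis(book, n):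
--     histogram = {}
--     for word in book:
--         histogram[word] = histogram.get(word, 0) + 1
--
--     total = len(book)
--     different = len(histogram)
--
--     # bucket (counting) sort by frequency instead of a comparison sort
--     maxc = max(histogram.values(), default=0)
--     buckets = [[] for _ in range(maxc + 1)]
--     for word, c in histogram.items():
--         buckets[c].append(word)
--     ordered = []
--     for c in range(maxc, 0, -1):
--         ordered.extend(buckets[c])
--
--     rank = [(word, histogram[word]) for word in ordered[:n - 1]]
--     return total, different, rank
-- ===== Notes on version B (the rewrite author's own statement) =====
-- stated objective: alternative
-- what changed: The ranking step's comparison sort (sorted(d, key=d.get, reverse=True)) is replaced by a counting/bucket sort: words are appended to buckets indexed by their frequency and the buckets are concatenated from the highest count down, which reproduces the stable descending order; histogram, totals and the [:n-1] slice are unchanged.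
import Mathlib
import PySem

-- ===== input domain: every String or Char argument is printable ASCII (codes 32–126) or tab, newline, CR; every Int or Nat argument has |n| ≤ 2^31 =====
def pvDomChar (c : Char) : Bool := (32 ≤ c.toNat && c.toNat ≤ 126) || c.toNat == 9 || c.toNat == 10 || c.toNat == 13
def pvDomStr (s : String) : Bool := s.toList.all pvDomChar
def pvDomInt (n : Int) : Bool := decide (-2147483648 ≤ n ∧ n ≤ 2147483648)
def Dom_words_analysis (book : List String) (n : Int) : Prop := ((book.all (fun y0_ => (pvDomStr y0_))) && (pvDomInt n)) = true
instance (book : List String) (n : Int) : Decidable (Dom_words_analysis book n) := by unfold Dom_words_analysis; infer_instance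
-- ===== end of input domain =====

-- B replaces A's comparison sort of the histogram keys by a counting/bucket sort by frequency
-- (buckets indexed by count, concatenated from the highest count down); same histogram totals
-- and the same slice [:n-1]. Objective: alternative algorithm for the ranking step.

-- ===== PORT A =====
-- most_frequent(d, x): every word sorted/looked up is a key of d, so Python's d.get(word)
-- and d[word] (an Int, never a KeyError/None) are ported as d.getD word 0.
def most_frequent (d : PySem.Dict String Int) (x : Int) : List (String × Int) :=
  let t := PySem.List.sorted d.keys (fun w => d.getD w 0) true
  (PySem.List.slice t none (some (x - 1))).foldl (fun result w => result ++ [(w, d.getD w 0)]) []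

def words_analysis (book : List String) (n : Int) : Int × Int × (List (String × Int)) :=
  let histogram := book.foldl
    (fun h w => let h1 := h.setdefault w 0; h1.insert w (1 + h1.getD w 0)) PySem.Dict.empty
  let total := PySem.List.len book
  let different := (histogram.size : Int)
  let rank := most_frequent histogram n
  (total, different, rank)

-- ===== PORT B =====
def words_analysis_alt (book : List String) (n : Int) : Int × Int × (List (String × Int)) :=
  let histogram := book.foldl (fun h w => h.insert w (h.getD w 0 + 1)) PySem.Dict.empty
  let total := PySem.List.len book
  let different := (histogram.size : Int)
  let maxc := PySem.List.maxD histogram.values (fun c => c) 0   -- max(values, default=0)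
  -- [[] for _ in range(maxc + 1)]  (maxc ≥ 0 always, so (maxc + 1).toNat = maxc.toNat + 1)
  let buckets := histogram.items.foldl
    (fun bs p => PySem.List.pySetD bs p.2 (PySem.List.pyGetD bs p.2 [] ++ [p.1]))
    (List.replicate (maxc.toNat + 1) ([] : List String))
  let ordered := (PySem.List.pyRange maxc 0 (-1)).foldl
    (fun acc c => acc ++ PySem.List.pyGetD buckets c []) []
  let rank := (PySem.List.slice ordered none (some (n - 1))).map (fun w => (w, histogram.getD w 0))
  (total, different, rank)

-- ===== PRECONDITION & SPEC =====
def Spec_words_analysis (book : List String) (n : Int) (out : Int × Int × (List (String × Int))) : Prop := out = words_analysis_alt book n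
instance (book : List String) (n : Int) (out : Int × Int × (List (String × Int))) : Decidable (Spec_words_analysis book n out) := by unfold Spec_words_analysis; infer_instance

-- ===== CLAIM (what is proved, stated in full; the proofs are below) =====
def Claim_equal_words_analysis : Prop := ∀ (book : List String) (n : Int), Dom_words_analysis book n → Spec_words_analysis book n (words_analysis book n)

-- ===== LEMMAS AND PROOFS =====

-- ---- generic facts about Python's stable reverse insertion sort (Int-valued key) ----
theorem filter_eq_nil_of_lt {α : Type} (k : α → Int) (c : Int) (l : List α)
    (h : ∀ y ∈ l, k y < c) : l.filter (fun y => decide (k y = c)) = [] := by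
  rw [List.filter_eq_nil_iff]
  intro y hy
  have := h y hy
  simp; omega

theorem pairwise_insertBy {α : Type} (k : α → Int) (x : α) (acc : List α)
    (hacc : acc.Pairwise (fun a b => k b ≤ k a)) :
    (PySem.List.insertBy (fun a b => decide (k b < k a)) x acc).Pairwise (fun a b => k b ≤ k a) := by
  induction acc with
  | nil => simp [PySem.List.insertBy]
  | cons y ys ih =>
    rw [List.pairwise_cons] at hacc
    simp only [PySem.List.insertBy]
    split
    · rename_i hlt
      simp only [decide_eq_true_eq] at hlt
      constructor
      · intro z hz
        rcases List.mem_cons.mp hz with rfl | hz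
        · omega
        · have := hacc.1 z hz; omega
      · exact List.Pairwise.cons hacc.1 hacc.2
    · rename_i hnlt
      simp only [decide_eq_true_eq] at hnlt
      constructor
      · intro z hz
        rw [PySem.List.mem_insertBy] at hz
        rcases hz with rfl | hz
        · omega
        · exact hacc.1 z hz
      · exact ih hacc.2

theorem filter_insertBy {α : Type} (k : α → Int) (x : α) (c : Int) (acc : List α)
    (hacc : acc.Pairwise (fun a b => k b ≤ k a)) :
    (PySem.List.insertBy (fun a b => decide (k b < k a)) x acc).filter (fun y => decide (k y = c))
      = if k x = c then acc.filter (fun y => decide (k y = c)) ++ [x]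
        else acc.filter (fun y => decide (k y = c)) := by
  induction acc with
  | nil => simp [PySem.List.insertBy, List.filter]; split <;> simp_all
  | cons y ys ih =>
    rw [List.pairwise_cons] at hacc
    simp only [PySem.List.insertBy]
    split
    · rename_i hlt
      simp only [decide_eq_true_eq] at hlt
      by_cases hxc : k x = c
      · have hnil : (y :: ys).filter (fun z => decide (k z = c)) = [] := by
          apply filter_eq_nil_of_lt
          intro z hz
          rcases List.mem_cons.mp hz with rfl | hz
          · omega
          · have := hacc.1 z hz; omega
        rw [List.filter_cons_of_pos (by simp [hxc]), hnil]
        simp [hxc]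
      · rw [List.filter_cons_of_neg (by simp [hxc])]
        simp [hxc]
    · rename_i hnlt
      rw [List.filter_cons]
      rw [ih hacc.2]
      by_cases hxc : k x = c <;> by_cases hyc : k y = c <;> simp [hxc, hyc]

theorem sorted_rev_filter_aux {α : Type} (k : α → Int) (c : Int) :
    ∀ (xs : List α) (acc : List α), acc.Pairwise (fun a b => k b ≤ k a) →
    (xs.foldl (fun acc x => PySem.List.insertBy (fun a b => decide (k b < k a)) x acc) acc).filter (fun y => decide (k y = c))
      = acc.filter (fun y => decide (k y = c)) ++ xs.filter (fun y => decide (k y = c)) := by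
  intro xs
  induction xs with
  | nil => intro acc _; simp
  | cons x xs ih =>
    intro acc hacc
    rw [List.foldl_cons, ih _ (pairwise_insertBy k x acc hacc), filter_insertBy k x c acc hacc,
      List.filter_cons]
    by_cases hxc : k x = c <;> simp [hxc]

theorem sorted_rev_filter {α : Type} (k : α → Int) (xs : List α) (c : Int) :
    (PySem.List.sorted xs k true).filter (fun y => decide (k y = c))
      = xs.filter (fun y => decide (k y = c)) := by
  rw [PySem.List.sorted_rev_eq_foldl_insertBy, sorted_rev_filter_aux k c xs [] (by simp)]
  simp


theorem eq_of_pairwise_of_filter_eq {α : Type} (k : α → Int) :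
    ∀ (l1 l2 : List α), l1.Pairwise (fun a b => k b ≤ k a) → l2.Pairwise (fun a b => k b ≤ k a) →
      (∀ c, l1.filter (fun y => decide (k y = c)) = l2.filter (fun y => decide (k y = c))) →
      l1 = l2 := by
  intro l1
  induction l1 with
  | nil =>
    intro l2 _ _ hf
    cases l2 with
    | nil => rfl
    | cons b t2 =>
      exfalso
      have := hf (k b)
      rw [List.filter_cons_of_pos (by simp)] at this
      simp at this
  | cons a t ih =>
    intro l2 h1 h2 hf
    cases l2 with
    | nil =>
      exfalso
      have := hf (k a)
      rw [List.filter_cons_of_pos (by simp)] at this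
      simp at this
    | cons b t2 =>
      rw [List.pairwise_cons] at h1 h2
      -- k a = k b
      have hab : k a = k b := by
        have h1' : k a ≤ k b := by
          have hne : (b :: t2).filter (fun y => decide (k y = k a)) ≠ [] := by
            rw [← hf (k a), List.filter_cons_of_pos (by simp)]; simp
          obtain ⟨x, hx⟩ := List.exists_mem_of_ne_nil _ hne
          rw [List.mem_filter] at hx
          obtain ⟨hxmem, hxk⟩ := hx
          simp only [decide_eq_true_eq] at hxk
          rcases List.mem_cons.mp hxmem with rfl | hxt2
          · omega
          · have := h2.1 x hxt2; omega
        have h2' : k b ≤ k a := by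
          have hne : (a :: t).filter (fun y => decide (k y = k b)) ≠ [] := by
            rw [hf (k b), List.filter_cons_of_pos (by simp)]; simp
          obtain ⟨x, hx⟩ := List.exists_mem_of_ne_nil _ hne
          rw [List.mem_filter] at hx
          obtain ⟨hxmem, hxk⟩ := hx
          simp only [decide_eq_true_eq] at hxk
          rcases List.mem_cons.mp hxmem with rfl | hxt
          · omega
          · have := h1.1 x hxt; omega
        omega
      -- heads equal and tail filters equal
      have hfa := hf (k a)
      rw [List.filter_cons_of_pos (by simp), List.filter_cons_of_pos (by simp [hab])] at hfa
      have hhead : a = b := by exact (List.cons.injEq _ _ _ _ ▸ hfa).1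
      have htail : ∀ c, t.filter (fun y => decide (k y = c)) = t2.filter (fun y => decide (k y = c)) := by
        intro c
        by_cases hc : k a = c
        · subst hc
          exact (List.cons.injEq _ _ _ _ ▸ hfa).2
        · have := hf c
          rw [List.filter_cons_of_neg (by simp [hc]), List.filter_cons_of_neg (by simp [hab ▸ hc])] at this
          exact this
      rw [hhead, ih t2 h1.2 h2.2 htail]


-- ---- B's bucket machinery ----
theorem buckets_length {α : Type} (ps : List (α × Int)) :
    ∀ (bs : List (List α)),
    (ps.foldl (fun bs p => PySem.List.pySetD bs p.2 (PySem.List.pyGetD bs p.2 [] ++ [p.1])) bs).length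
      = bs.length := by
  induction ps with
  | nil => intro bs; rfl
  | cons p ps ih =>
    intro bs
    rw [List.foldl_cons, ih, PySem.List.length_pySetD]

theorem buckets_getD {α : Type} (ps : List (α × Int)) :
    ∀ (bs : List (List α)),
    (∀ p ∈ ps, 0 ≤ p.2 ∧ p.2 < (bs.length : Int)) → ∀ (j : Nat), j < bs.length →
    (ps.foldl (fun bs p => PySem.List.pySetD bs p.2 (PySem.List.pyGetD bs p.2 [] ++ [p.1])) bs).getD j []
      = bs.getD j [] ++ (ps.filter (fun p => decide (p.2 = (j : Int)))).map (·.1) := by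
  induction ps with
  | nil => intro bs _ j hj; simp
  | cons p ps ih =>
    intro bs h j hj
    have hp := h p List.mem_cons_self
    have hset : PySem.List.pySetD bs p.2 (PySem.List.pyGetD bs p.2 [] ++ [p.1])
        = bs.set p.2.toNat (PySem.List.pyGetD bs p.2 [] ++ [p.1]) :=
      PySem.List.pySetD_of_nonneg _ _ hp.1
    rw [List.foldl_cons, ih _ (by
        intro q hq
        have := h q (List.mem_cons_of_mem _ hq)
        rw [hset, List.length_set]
        exact this) j (by rw [hset, List.length_set]; exact hj)]
    rw [hset]
    rw [List.filter_cons]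
    by_cases hpj : p.2 = (j : Int)
    · have hjt : p.2.toNat = j := by omega
      have hget : PySem.List.pyGetD bs p.2 [] = bs.getD j [] := by
        rw [hpj, PySem.List.pyGetD_natCast]
      have : (bs.set p.2.toNat (PySem.List.pyGetD bs p.2 [] ++ [p.1])).getD j []
          = bs.getD j [] ++ [p.1] := by
        rw [hjt, List.getD_eq_getElem?_getD, List.getElem?_set, if_pos rfl, if_pos hj, hget]
        rfl
      rw [this]
      simp [hpj]
    · have : (bs.set p.2.toNat (PySem.List.pyGetD bs p.2 [] ++ [p.1])).getD j []
          = bs.getD j [] := by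
        rw [List.getD_eq_getElem?_getD, List.getElem?_set, if_neg (by omega),
          ← List.getD_eq_getElem?_getD]
      rw [this]
      simp [hpj]

theorem pyRange_down (a : Int) (ha : 0 ≤ a) :
    PySem.List.pyRange a 0 (-1) = (List.range a.toNat).map (fun kk : Nat => a - (kk : Int)) := by
  simp only [PySem.List.pyRange]
  rw [if_neg (by norm_num)]
  have h1 : ¬ ((0:Int) < -1) := by norm_num
  rw [if_neg h1]
  rcases lt_or_ge 0 a with h | h
  · rw [if_pos h]
    have : ((a - 0 + -(-1) - 1) / -(-1)).toNat = a.toNat := by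
      norm_num
    rw [this]
    apply List.map_congr_left
    intro x _
    ring
  · have : a = 0 := le_antisymm h ha
    subst this
    rw [if_neg (by norm_num)]
    simp

theorem flatMap_ite_single {α : Type} (c : Int) (f : List α) :
    ∀ (cs : List Int), cs.Nodup → c ∈ cs →
      cs.flatMap (fun c' => if c' = c then f else []) = f := by
  intro cs
  induction cs with
  | nil => intro _ h; simp at h
  | cons c' cs ih =>
    intro hnd hc
    rw [List.nodup_cons] at hnd
    rw [List.flatMap_cons]
    by_cases hcc : c' = c
    · subst hcc
      rw [if_pos rfl]
      have : cs.flatMap (fun c'' => if c'' = c' then f else []) = [] := by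
        apply List.flatMap_eq_nil_iff.mpr
        intro x hx
        rw [if_neg]; intro hxe; exact hnd.1 (hxe ▸ hx)
      rw [this, List.append_nil]
    · rw [if_neg hcc, List.nil_append]
      rcases List.mem_cons.mp hc with rfl | hc'
      · exact absurd rfl hcc
      · exact ih hnd.2 hc'

theorem pairwise_flatMap_blocks {α : Type} (k : α → Int) (K : List α) :
    ∀ (cs : List Int), cs.Pairwise (fun a b => b < a) →
      (cs.flatMap (fun c => K.filter (fun w => decide (k w = c)))).Pairwise (fun a b => k b ≤ k a) := by
  intro cs
  induction cs with
  | nil => intro _; simp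
  | cons c cs ih =>
    intro hp
    rw [List.pairwise_cons] at hp
    rw [List.flatMap_cons, List.pairwise_append]
    refine ⟨?_, ih hp.2, ?_⟩
    · apply List.pairwise_of_forall_mem_list
      intro a ha b hb
      rw [List.mem_filter] at ha hb
      have ha2 : k a = c := by simpa using ha.2
      have hb2 : k b = c := by simpa using hb.2
      omega
    · intro x hx y hy
      rw [List.mem_filter] at hx
      have hxk : k x = c := by simpa using hx.2
      rw [List.mem_flatMap] at hy
      obtain ⟨c', hc', hy'⟩ := hy
      rw [List.mem_filter] at hy'
      have hyk : k y = c' := by simpa using hy'.2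
      have := hp.1 c' hc'
      omega


-- ---- A's histogram loop is the Counter loop ----
theorem dict_insert_insert {κ ν : Type} [BEq κ] [LawfulBEq κ] (d : PySem.Dict κ ν) (k : κ) (v v' : ν) :
    (d.insert k v).insert k v' = d.insert k v' := by
  have hany : ∀ (w : ν), (List.map (fun p => if (p.1 == k) = true then (k, w) else p) d.items).any (fun p => p.1 == k) = d.items.any (fun p => p.1 == k) := by
    intro w
    rw [List.any_map]
    congr 1
    funext p
    by_cases hp : (p.1 == k) = true <;> simp [hp, Function.comp]
  apply PySem.Dict.ext
  simp only [PySem.Dict.insert, PySem.Dict.contains]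
  by_cases hc : d.items.any (fun p => p.1 == k) = true
  · rw [if_pos hc, if_pos hc]
    rw [if_pos ((hany v).trans hc), List.map_map]
    apply List.map_congr_left
    intro p _
    by_cases hp : (p.1 == k) = true <;> simp [hp, Function.comp]
  · have hcf : (d.items.any fun p => p.1 == k) = false := Bool.eq_false_iff.mpr hc
    simp only [hcf, Bool.false_eq_true, if_false]
    rw [if_pos (by simp), List.map_append]
    have hid : List.map (fun p => if (p.1 == k) = true then (k, v') else p) d.items = d.items := by
      conv_rhs => rw [← List.map_id d.items]
      apply List.map_congr_left
      intro p hp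
      have hpk : (p.1 == k) = false := by
        rcases Bool.eq_false_or_eq_true (p.1 == k) with h | h
        · exact absurd (List.any_eq_true.mpr ⟨p, hp, h⟩) (by rw [hcf]; simp)
        · exact h
      simp [hpk]
    rw [hid]
    simp

theorem stepA_eq_counter_step (h : PySem.Dict String Int) (w : String) :
    (let h1 := h.setdefault w 0; h1.insert w (1 + h1.getD w 0)) = h.insert w (h.getD w 0 + 1) := by
  show (h.setdefault w 0).insert w (1 + (h.setdefault w 0).getD w 0) = _
  cases hc : h.contains w with
  | true =>
    have hsd : h.setdefault w 0 = h := by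
      simp only [PySem.Dict.setdefault, hc, if_pos]
    rw [hsd, Int.add_comm]
  | false =>
    have hsd : h.setdefault w 0 = h.insert w 0 := by
      simp only [PySem.Dict.setdefault, PySem.Dict.insert, hc]
      simp
    rw [hsd, PySem.Dict.getD_insert_self, dict_insert_insert,
      PySem.Dict.getD_of_not_contains h 0 hc]
    norm_num

theorem histogram_eq (book : List String) :
    book.foldl (fun h w => let h1 := h.setdefault w 0; h1.insert w (1 + h1.getD w 0)) PySem.Dict.empty
      = PySem.Dict.counter book := by
  rw [← PySem.Dict.foldl_insert_getD_add_one_eq_counter]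
  exact List.foldl_ext _ _ _ (fun d w _ => stepA_eq_counter_step d w)


theorem mem_pyRange_down (a c : Int) (ha : 0 ≤ a) :
    c ∈ PySem.List.pyRange a 0 (-1) ↔ 1 ≤ c ∧ c ≤ a := by
  rw [pyRange_down a ha, List.mem_map]
  constructor
  · rintro ⟨kk, hkk, rfl⟩
    rw [List.mem_range] at hkk
    omega
  · rintro ⟨h1, h2⟩
    refine ⟨(a - c).toNat, ?_, ?_⟩
    · rw [List.mem_range]; omega
    · omega

theorem pairwise_gt_pyRange_down (a : Int) (ha : 0 ≤ a) :
    (PySem.List.pyRange a 0 (-1)).Pairwise (fun x y => y < x) := by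
  rw [pyRange_down a ha, List.pairwise_map]
  apply List.Pairwise.imp (R := fun x y => x < y)
  · intro x y h; omega
  · exact List.pairwise_lt_range

theorem sorted_eq_ordered (book : List String) :
    PySem.List.sorted (PySem.Set.ofList book) (fun w => ((book.count w : Int))) true
      = ((PySem.List.pyRange (PySem.List.maxD (PySem.Dict.counter book).values (fun c => c) 0) 0 (-1)).foldl
          (fun acc c => acc ++ PySem.List.pyGetD
            ((PySem.Dict.counter book).items.foldl
              (fun bs p => PySem.List.pySetD bs p.2 (PySem.List.pyGetD bs p.2 [] ++ [p.1]))
              (List.replicate ((PySem.List.maxD (PySem.Dict.counter book).values (fun c => c) 0).toNat + 1) ([] : List String)))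
            c []) []) := by
  set cnt : String → Int := fun w => ((book.count w : Int)) with hcnt
  set K : List String := PySem.Set.ofList book with hK
  set maxc : Int := PySem.List.maxD (PySem.Dict.counter book).values (fun c => c) 0 with hmaxc
  have hitems : (PySem.Dict.counter book).items = K.map (fun w => (w, cnt w)) := by
    rw [PySem.Dict.items_counter]
  have hvals : (PySem.Dict.counter book).values = K.map cnt := by
    show List.map _ (PySem.Dict.counter book).items = _
    rw [hitems, List.map_map]
    rfl
  have hcnt1 : ∀ w ∈ K, 1 ≤ cnt w := by
    intro w hw
    rw [hK, PySem.Set.mem_ofList] at hw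
    have := List.count_pos_iff.mpr hw
    simp only [hcnt]
    omega
  have hm0 : 0 ≤ maxc := by
    rw [hmaxc, PySem.List.maxD]
    cases hmx : PySem.List.max? (PySem.Dict.counter book).values (fun c => c) with
    | none => simp
    | some m =>
      simp only [Option.getD_some]
      have hmem := PySem.List.max?_mem hmx
      rw [hvals, List.mem_map] at hmem
      obtain ⟨w, hw, rfl⟩ := hmem
      have := hcnt1 w hw
      omega
  have hmax : ∀ w ∈ K, cnt w ≤ maxc := by
    intro w hw
    have hv : cnt w ∈ (PySem.Dict.counter book).values := by
      rw [hvals, List.mem_map]; exact ⟨w, hw, rfl⟩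
    rw [hmaxc, PySem.List.maxD]
    cases hmx : PySem.List.max? (PySem.Dict.counter book).values (fun c => c) with
    | none =>
      rw [PySem.List.max?_eq_none_iff] at hmx
      rw [hmx] at hv
      simp at hv
    | some m =>
      simp only [Option.getD_some]
      exact PySem.List.max?_isMax hmx _ hv
  clear_value cnt K maxc
  set buckets : List (List String) := (PySem.Dict.counter book).items.foldl
      (fun bs p => PySem.List.pySetD bs p.2 (PySem.List.pyGetD bs p.2 [] ++ [p.1]))
      (List.replicate (maxc.toNat + 1) ([] : List String)) with hbuckets
  clear_value buckets
  have hblen : buckets.length = maxc.toNat + 1 := by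
    rw [hbuckets, buckets_length, List.length_replicate]
  have hbucket : ∀ c : Int, 1 ≤ c → c ≤ maxc →
      PySem.List.pyGetD buckets c [] = K.filter (fun w => decide (cnt w = c)) := by
    intro c h1 h2
    have hcl : c < (buckets.length : Int) := by rw [hblen]; push_cast; omega
    rw [PySem.List.pyGetD_eq_getElem buckets [] (by omega) hcl]
    have hget : buckets[c.toNat] = buckets.getD c.toNat [] := by
      rw [List.getD_eq_getElem buckets ([] : List String) (n := c.toNat) (by rw [hblen]; omega)]
    have hbin : ∀ p ∈ (PySem.Dict.counter book).items,
        0 ≤ p.2 ∧ p.2 < ((List.replicate (maxc.toNat + 1) ([] : List String)).length : Int) := by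
      intro p hp
      rw [hitems, List.mem_map] at hp
      obtain ⟨w, hw, rfl⟩ := hp
      have := hcnt1 w hw
      have := hmax w hw
      rw [List.length_replicate]
      constructor
      · simp only; omega
      · simp only; push_cast; omega
    have hj : c.toNat < (List.replicate (maxc.toNat + 1) ([] : List String)).length := by
      rw [List.length_replicate]; omega
    rw [hget, hbuckets, buckets_getD _ _ hbin c.toNat hj]
    rw [List.getD_replicate, hitems, List.filter_map, List.map_map, List.nil_append]
    have hc' : ((c.toNat : Nat) : Int) = c := by omega
    simp [Function.comp_def, hc']
    omega
  rw [PySem.List.foldl_append_eq_flatMap, List.nil_append]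
  have hmapeq : (PySem.List.pyRange maxc 0 (-1)).map (fun c => PySem.List.pyGetD buckets c [])
      = (PySem.List.pyRange maxc 0 (-1)).map (fun c => K.filter (fun w => decide (cnt w = c))) := by
    apply List.map_congr_left
    intro c hc
    rw [mem_pyRange_down _ _ hm0] at hc
    exact hbucket c hc.1 hc.2
  rw [List.flatMap_def, hmapeq, ← List.flatMap_def]
  -- now the pure sorting fact
  apply eq_of_pairwise_of_filter_eq cnt
  · exact PySem.List.sorted_pairwise_rev K cnt
  · exact pairwise_flatMap_blocks cnt K _ (pairwise_gt_pyRange_down maxc hm0)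
  · intro c
    rw [sorted_rev_filter]
    rw [List.filter_flatMap]
    have hinner : ∀ c' : Int,
        (K.filter (fun w => decide (cnt w = c'))).filter (fun y => decide (cnt y = c))
          = if c' = c then K.filter (fun y => decide (cnt y = c)) else [] := by
      intro c'
      rw [List.filter_filter]
      by_cases hcc : c' = c
      · subst hcc
        simp
      · rw [List.filter_eq_nil_iff.mpr]
        · simp [hcc]
        · intro w _
          simp only [Bool.and_eq_true, decide_eq_true_eq]
          rintro ⟨h1, h2⟩
          exact hcc (h2 ▸ h1)
    have hflat : (PySem.List.pyRange maxc 0 (-1)).flatMap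
          (fun c' => (K.filter (fun w => decide (cnt w = c'))).filter (fun y => decide (cnt y = c)))
        = (PySem.List.pyRange maxc 0 (-1)).flatMap
          (fun c' => if c' = c then K.filter (fun y => decide (cnt y = c)) else []) := by
      rw [List.flatMap_def, List.flatMap_def, List.map_congr_left]
      intro c' _
      exact hinner c'
    rw [hflat]
    by_cases hc : c ∈ PySem.List.pyRange maxc 0 (-1)
    · rw [flatMap_ite_single c _ _ ?_ hc]
      exact ((pairwise_gt_pyRange_down maxc hm0).imp (fun {a b} h => by omega : ∀ {a b : Int}, b < a → a ≠ b))
    · rw [List.flatMap_eq_nil_iff.mpr, List.filter_eq_nil_iff.mpr]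
      · intro w hw
        simp only [decide_eq_true_eq]
        intro hwc
        apply hc
        rw [mem_pyRange_down _ _ hm0, ← hwc]
        exact ⟨hcnt1 w hw, hmax w hw⟩
      · intro x hx
        rw [if_neg]
        intro hxe
        exact hc (hxe ▸ hx)

theorem words_analysis_eq_alt (book : List String) (n : Int) :
    words_analysis book n = words_analysis_alt book n := by
  simp only [words_analysis, words_analysis_alt, most_frequent]
  rw [histogram_eq, PySem.Dict.foldl_insert_getD_add_one_eq_counter,
    PySem.List.foldl_append_singleton_eq_map]
  simp only [List.nil_append, PySem.Dict.getD_counter, PySem.Dict.keys_counter]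
  rw [sorted_eq_ordered]

-- ===== VERDICT (by name: the statement is the Claim_ definition above) =====
theorem words_analysis_spec : Claim_equal_words_analysis := by
  unfold Claim_equal_words_analysis Spec_words_analysis
  intro book n _
  exact words_analysis_eq_alt book n
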